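-- pv_equiv track=rewrite | github.com/parmalla/aoc | 2025/06.py | get_ceph_row
-- ===== SOURCE A (Python) =====
-- from itertools import zip_longest
--
-- def digits_to_int(digits: list[int]) -> int:
--     n = 0
--     for d in digits:
--         n = n * 10 + d
--     return n
--
-- def get_ceph_row(row: list[list[int]], alignment: str) -> list[int]:
--     cols = list(zip_longest(*row, fillvalue=None))
--
--     if alignment == "r":
--         max_len = len(cols[0])
--         padded = [
--             tuple([None] * (max_len - len(r)) + r)
--             for r in row
--         ]
--         cols = list(zip_longest(*padded, fillvalue=None))
--
--     nums = []
--     for col in cols: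
--         digits = [d for d in col if d is not None]
--         if digits:
--             nums.append(digits_to_int(digits))
--     return nums[::-1]
-- ===== SOURCE B (Python) =====
-- def get_ceph_row(row: list[list[int]], alignment: str) -> list[int]:
--     n = len(row)
--     if alignment == "r":
--         offs = [max(0, n - len(r)) for r in row]
--     else:
--         offs = [0] * n
--     width = max((o + len(r) for o, r in zip(offs, row)), default=0)
--     acc = [None] * width
--     for o, r in zip(offs, row):
--         for k, d in enumerate(r):
--             j = o + k
--             acc[j] = d if acc[j] is None else acc[j] * 10 + d
--     return [v for v in reversed(acc) if v is not None]
-- ===== Notes on version B (the rewrite author's own statement) =====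
-- stated objective: alternative
-- what changed: B never transposes: instead of materializing columns twice via zip_longest and converting each column list, it makes one forward pass over the rows updating a per-column accumulator array (acc[j] = acc[j]*10 + d) at offset positions, then reads the accumulators back-to-front.
import Mathlib
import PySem

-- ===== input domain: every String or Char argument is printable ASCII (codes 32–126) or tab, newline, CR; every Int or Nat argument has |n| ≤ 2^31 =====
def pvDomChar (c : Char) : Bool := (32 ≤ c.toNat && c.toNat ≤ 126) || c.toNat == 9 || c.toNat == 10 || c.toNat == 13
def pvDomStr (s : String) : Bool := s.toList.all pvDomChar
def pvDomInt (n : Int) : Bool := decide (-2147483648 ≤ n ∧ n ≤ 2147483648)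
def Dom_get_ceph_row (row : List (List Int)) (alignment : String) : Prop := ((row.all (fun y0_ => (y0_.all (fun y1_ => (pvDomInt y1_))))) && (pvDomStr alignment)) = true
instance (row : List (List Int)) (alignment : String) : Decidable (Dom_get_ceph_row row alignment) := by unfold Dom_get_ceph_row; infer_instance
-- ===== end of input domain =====

-- B replaces A's double zip_longest transposition by a single forward pass over the rows
-- that updates per-column integer accumulators in place (alternative decomposition, same cost).


-- ===== PORT A =====
def digits_to_int (digits : List Int) : Int := digits.foldl (fun n d => n * 10 + d) 0

-- port of itertools.zip_longest(*rows, fillvalue=None) over rows of Option Int: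
-- column i holds, per row, the element at index i, or the fill `none` past the row's end
def pyZipLongest (rows : List (List (Option Int))) : List (List (Option Int)) :=
  (List.range (rows.foldl (fun a r => max a r.length) 0)).map
    (fun i => rows.map (fun r => (r[i]?).join))

def get_ceph_row (row : List (List Int)) (alignment : String) : List Int :=
  let cols := pyZipLongest (row.map (fun r => r.map some))
  let cols := if alignment == "r" then
      -- cols[0]: the IndexError case (cols = []) is excluded by Pre_get_ceph_row
      let max_len := (cols.headD []).length
      -- [None] * (max_len - len(r)) + r : Nat subtraction = Python's empty list on a negative count
      let padded := row.map (fun r => List.replicate (max_len - r.length) (none : Option Int) ++ r.map some)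
      pyZipLongest padded
    else cols
  let nums := cols.foldl (fun nums col =>
      let digits := col.filterMap id
      if digits ≠ [] then nums ++ [digits_to_int digits] else nums) ([] : List Int)
  nums.reverse

-- ===== PORT B =====
-- acc[j] = d if acc[j] is None else acc[j] * 10 + d
def pvUpd (v : Option Int) (d : Int) : Int := match v with | none => d | some x => x * 10 + d

def get_ceph_row_alt (row : List (List Int)) (alignment : String) : List Int :=
  let n := row.length
  -- max(0, n - len(r)) : Nat subtraction is exactly Python's max(0, …) here
  let offs : List Nat := if alignment == "r" then row.map (fun r => n - r.length) else List.replicate n 0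
  let width := (offs.zip row).foldl (fun a p => max a (p.1 + p.2.length)) 0
  let acc : List (Option Int) := List.replicate width (none : Option Int)
  let acc := (offs.zip row).foldl (fun acc p =>
      p.2.zipIdx.foldl (fun acc dk =>
        acc.set (p.1 + dk.2) (some (pvUpd (acc[p.1 + dk.2]?).join dk.1))) acc) acc
  acc.reverse.filterMap id

-- ===== PRECONDITION & SPEC =====
-- Pre_ excludes exactly the inputs where A raises IndexError: alignment "r" with no column
-- to read cols[0] from (all rows empty, or no rows at all).
def Pre_get_ceph_row (row : List (List Int)) (alignment : String) : Prop :=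
  alignment = "r" → ∃ r ∈ row, r ≠ []
instance (row : List (List Int)) (alignment : String) : Decidable (Pre_get_ceph_row row alignment) := by unfold Pre_get_ceph_row; infer_instance

def pvWitness_get_ceph_row : List (List Int) × String := ([[1, 2], [3]], "r")

def Spec_get_ceph_row (row : List (List Int)) (alignment : String) (out : List Int) : Prop := out = get_ceph_row_alt row alignment
instance (row : List (List Int)) (alignment : String) (out : List Int) : Decidable (Spec_get_ceph_row row alignment out) := by unfold Spec_get_ceph_row; infer_instance

-- ===== CLAIM (what is proved, stated in full; the proofs are below) =====
def Claim_equal_get_ceph_row : Prop := ∀ (row : List (List Int)) (alignment : String), Dom_get_ceph_row row alignment → Pre_get_ceph_row row alignment → Spec_get_ceph_row row alignment (get_ceph_row row alignment)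

-- ===== LEMMAS AND PROOFS =====

-- row r placed at offset o, as A pads it
def pvPad (p : Nat × List Int) : List (Option Int) :=
  List.replicate p.1 (none : Option Int) ++ p.2.map some

-- the digits contributed to column j by offset-annotated rows, top to bottom
def pvColDigits (zs : List (Nat × List Int)) (j : Nat) : List Int :=
  zs.filterMap (fun p => if p.1 ≤ j then p.2[j - p.1]? else none)

-- folding those digits into an accumulator, as B does
def pvApplyCol (zs : List (Nat × List Int)) (j : Nat) (v : Option Int) : Option Int :=
  (pvColDigits zs j).foldl (fun v d => some (pvUpd v d)) v

-- the common reference both ports are reduced to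
def pvRef (zs : List (Nat × List Int)) : List Int :=
  ((List.range (zs.foldl (fun a p => max a (p.1 + p.2.length)) 0)).filterMap
    (fun j => pvApplyCol zs j none)).reverse

lemma pv_foldl_max_init {α : Type} (f : α → Nat) (l : List α) : ∀ a : Nat, a ≤ l.foldl (fun a y => max a (f y)) a := by
  induction l with
  | nil => intro a; simp
  | cons x xs ih => intro a; exact le_trans (le_max_left _ _) (ih (max a (f x)))

lemma pv_foldl_max_ge {α : Type} (f : α → Nat) (l : List α) : ∀ (a : Nat) (x : α), x ∈ l → f x ≤ l.foldl (fun a y => max a (f y)) a := by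
  induction l with
  | nil => intro a x hx; cases hx
  | cons y ys ih =>
    intro a x hx
    rcases List.mem_cons.mp hx with rfl | hx
    · exact le_trans (le_max_right _ _) (pv_foldl_max_init f ys _)
    · exact ih _ x hx

lemma pv_inner_length (r : List Int) (o : Nat) : ∀ (m : Nat) (acc : List (Option Int)),
    (List.foldl (fun acc dk =>
        acc.set (o + dk.2) (some (pvUpd (acc[o + dk.2]?).join dk.1))) acc (r.zipIdx m)).length = acc.length := by
  induction r with
  | nil => intro m acc; simp
  | cons d r ih =>
    intro m acc
    rw [List.zipIdx_cons, List.foldl_cons]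
    dsimp only
    rw [ih]
    exact List.length_set

lemma pv_inner_get (r : List Int) (o : Nat) : ∀ (m : Nat) (acc : List (Option Int)),
    o + m + r.length ≤ acc.length → ∀ j,
    (List.foldl (fun acc dk =>
        acc.set (o + dk.2) (some (pvUpd (acc[o + dk.2]?).join dk.1))) acc (r.zipIdx m))[j]?
    = if o + m ≤ j ∧ j < o + m + r.length
      then (acc[j]?).map (fun v => some (pvUpd v ((r[j - (o + m)]?).getD 0)))
      else acc[j]? := by
  induction r with
  | nil =>
    intro m acc h j
    simp only [List.zipIdx_nil, List.foldl_nil, List.length_nil]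
    rw [if_neg (by omega)]
  | cons d r ih =>
    intro m acc h j
    simp only [List.length_cons] at h
    rw [List.zipIdx_cons, List.foldl_cons]
    dsimp only
    rw [ih (m + 1) _ (by rw [List.length_set]; omega) j]
    rcases Nat.lt_trichotomy j (o + m) with hlt | heq | hgt
    · rw [if_neg (by omega), if_neg (by simp only [List.length_cons]; omega)]
      rw [List.getElem?_set, if_neg (by omega)]
    · subst heq
      rw [if_neg (by omega), if_pos (by simp only [List.length_cons]; omega : o + m ≤ o + m ∧ o + m < o + m + (d :: r).length)]
      rw [List.getElem?_set, if_pos rfl, if_pos (by omega)]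
      rw [List.getElem?_eq_getElem (show o + m < acc.length by omega)]
      simp
    · by_cases hin : j < o + m + 1 + r.length
      · rw [if_pos (by omega), if_pos (by simp only [List.length_cons]; omega : o + m ≤ j ∧ j < o + m + (d :: r).length)]
        rw [List.getElem?_set, if_neg (by omega)]
        have hidx : j - (o + m) = (j - (o + (m + 1))) + 1 := by omega
        rw [hidx, List.getElem?_cons_succ]
      · rw [if_neg (by omega), if_neg (by simp only [List.length_cons]; omega)]
        rw [List.getElem?_set, if_neg (by omega)]

lemma pv_applyCol_cons (p : Nat × List Int) (zs : List (Nat × List Int)) (j : Nat) (v : Option Int) :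
    pvApplyCol (p :: zs) j v
    = pvApplyCol zs j (if p.1 ≤ j ∧ j < p.1 + p.2.length then some (pvUpd v ((p.2[j - p.1]?).getD 0)) else v) := by
  obtain ⟨o, r⟩ := p
  dsimp only
  unfold pvApplyCol pvColDigits
  rw [List.filterMap_cons]
  dsimp only
  by_cases hc : o ≤ j ∧ j < o + r.length
  · have hlt : j - o < r.length := by omega
    rw [if_pos hc.1, List.getElem?_eq_getElem hlt]
    simp only [List.foldl_cons]
    rw [if_pos hc]
    rfl
  · rw [if_neg hc]
    by_cases ho : o ≤ j
    · have hnone : r[j - o]? = none := List.getElem?_eq_none (by omega)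
      rw [if_pos ho, hnone]
    · rw [if_neg ho]

lemma pv_outer_get (zs : List (Nat × List Int)) : ∀ (acc : List (Option Int)),
    (∀ p ∈ zs, p.1 + p.2.length ≤ acc.length) → ∀ j,
    (List.foldl (fun acc p =>
        List.foldl (fun acc dk =>
          acc.set (p.1 + dk.2) (some (pvUpd (acc[p.1 + dk.2]?).join dk.1))) acc p.2.zipIdx) acc zs)[j]?
    = (acc[j]?).map (fun v => pvApplyCol zs j v) := by
  induction zs with
  | nil =>
    intro acc _ j
    simp [pvApplyCol, pvColDigits]
  | cons p zs ih =>
    intro acc hlen j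
    rw [List.foldl_cons]
    have hl : p.1 + 0 + p.2.length ≤ acc.length := by
      have := hlen p (by simp)
      omega
    have hlen2 : ∀ q ∈ zs, q.1 + q.2.length ≤
        (List.foldl (fun acc dk =>
          acc.set (p.1 + dk.2) (some (pvUpd (acc[p.1 + dk.2]?).join dk.1))) acc p.2.zipIdx).length := by
      intro q hq
      rw [pv_inner_length p.2 p.1 0 acc]
      exact hlen q (List.mem_cons_of_mem _ hq)
    rw [ih _ hlen2 j, pv_inner_get p.2 p.1 0 acc hl j]
    simp only [Nat.add_zero]
    by_cases hc : p.1 ≤ j ∧ j < p.1 + p.2.length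
    · rw [if_pos hc]
      cases hacc : acc[j]? with
      | none => simp
      | some v =>
        simp only [Option.map_some]
        rw [pv_applyCol_cons, if_pos hc]
    · rw [if_neg hc]
      cases hacc : acc[j]? with
      | none => simp
      | some v =>
        simp only [Option.map_some]
        rw [pv_applyCol_cons, if_neg hc]

lemma pv_apply_some (ds : List Int) : ∀ a : Int,
    List.foldl (fun v d => some (pvUpd v d)) (some a) ds = some (ds.foldl (fun n d => n * 10 + d) a) := by
  induction ds with
  | nil => intro a; simp
  | cons d ds ih => intro a; simp only [List.foldl_cons]; rw [ih]; rfl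

lemma pv_apply_none (ds : List Int) :
    List.foldl (fun v d => some (pvUpd v d)) none ds
    = if ds = [] then none else some (digits_to_int ds) := by
  cases ds with
  | nil => simp
  | cons d ds =>
    simp only [List.foldl_cons]
    rw [show pvUpd none d = d from rfl, pv_apply_some]
    simp [digits_to_int]

-- the A-side loop, written as a filterMap
lemma pv_nums_filterMap (l : List (List (Option Int))) : ∀ acc : List Int,
    List.foldl (fun nums col =>
      let digits := col.filterMap id
      if digits ≠ [] then nums ++ [digits_to_int digits] else nums) acc l
    = acc ++ l.filterMap (fun col =>
        let ds := col.filterMap id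
        if ds = [] then none else some (digits_to_int ds)) := by
  induction l with
  | nil => intro acc; simp
  | cons col l ih =>
    intro acc
    simp only [List.foldl_cons, List.filterMap_cons]
    by_cases hc : col.filterMap id = []
    · rw [if_neg (not_not_intro hc), if_pos hc, ih]
    · rw [if_pos hc, if_neg hc, ih, List.append_assoc]
      rfl

-- column j of A's padded matrix, read through pvPad
lemma pv_pad_get (p : Nat × List Int) (j : Nat) :
    ((pvPad p)[j]?).join = if p.1 ≤ j then p.2[j - p.1]? else none := by
  obtain ⟨o, r⟩ := p
  unfold pvPad
  rw [List.getElem?_append]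
  by_cases hj : j < o
  · simp [hj, Nat.not_le.mpr hj]
  · simp only [List.length_replicate, if_neg hj]
    rw [if_pos (by omega), List.getElem?_map]
    cases r[j - o]? <;> simp

lemma pv_col_eq (zs : List (Nat × List Int)) (j : Nat) :
    ((zs.map pvPad).map (fun r => (r[j]?).join)).filterMap id = pvColDigits zs j := by
  rw [List.map_map, List.filterMap_map]
  unfold pvColDigits
  apply List.filterMap_congr
  intro p _
  simp [Function.comp, pv_pad_get]

lemma pv_zip_map {α β : Type} (f : α → β) (l : List α) :
    (l.map f).zip l = l.map (fun x => (f x, x)) := by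
  induction l with
  | nil => rfl
  | cons x xs ih => simp [ih]

-- B equals the reference
lemma pv_B_eq_ref (row : List (List Int)) (alignment : String) :
    get_ceph_row_alt row alignment
    = pvRef (row.map (fun r => ((if alignment == "r" then row.length - r.length else 0), r))) := by
  simp only [get_ceph_row_alt]
  have hoffs : (if alignment == "r" then row.map (fun r => row.length - r.length)
      else List.replicate row.length 0).zip row
      = row.map (fun r => ((if alignment == "r" then row.length - r.length else 0), r)) := by
    cases hb : (alignment == "r") with
    | true =>
      simp only [if_true]
      exact pv_zip_map _ row
    | false =>
      simp only [Bool.false_eq_true, if_false]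
      rw [← List.map_const' (b := (0 : Nat))]
      exact pv_zip_map _ row
  rw [hoffs]
  simp only [pvRef]
  set zs := row.map (fun r => ((if alignment == "r" then row.length - r.length else 0), r)) with hzs
  set w := zs.foldl (fun a p => max a (p.1 + p.2.length)) 0 with hw
  have hmap : (List.foldl (fun acc p =>
      List.foldl (fun acc dk =>
        acc.set (p.1 + dk.2) (some (pvUpd (acc[p.1 + dk.2]?).join dk.1))) acc p.2.zipIdx)
      (List.replicate w (none : Option Int)) zs)
      = (List.range w).map (fun j => pvApplyCol zs j none) := by
    apply List.ext_getElem?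
    intro j
    rw [pv_outer_get zs _ (fun p hp => by
        rw [List.length_replicate]
        exact pv_foldl_max_ge (fun p => p.1 + p.2.length) zs 0 p hp) j]
    rw [List.getElem?_map, List.getElem?_replicate]
    by_cases hj : j < w
    · rw [if_pos hj, List.getElem?_range hj]
      simp
    · rw [if_neg hj, List.getElem?_eq_none (by rw [List.length_range]; omega)]
      simp
  rw [hmap, List.filterMap_reverse, List.filterMap_map]
  rfl

-- under Pre_, A's max_len (= len(cols[0])) is the number of rows
lemma pv_maxlen_head (row : List (List Int)) (h : ∃ r ∈ row, r ≠ []) :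
    ((pyZipLongest (row.map (fun r => r.map some))).headD []).length = row.length := by
  unfold pyZipLongest
  obtain ⟨r, hr, hne⟩ := h
  have hm : 0 < (row.map (fun r => r.map some)).foldl (fun a r => max a r.length) 0 := by
    have h1 : (r.map some).length ≤ (row.map (fun r => r.map some)).foldl (fun a r => max a r.length) 0 :=
      pv_foldl_max_ge _ _ 0 _ (List.mem_map_of_mem hr)
    have h2 : 0 < r.length := List.length_pos_iff.mpr hne
    simp only [List.length_map] at h1
    omega
  rw [List.headD_eq_head?, List.head?_eq_getElem?, List.getElem?_map, List.getElem?_range hm]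
  simp

-- A equals the reference
lemma pv_A_eq_ref (row : List (List Int)) (alignment : String) (hpre : Pre_get_ceph_row row alignment) :
    get_ceph_row row alignment
    = pvRef (row.map (fun r => ((if alignment == "r" then row.length - r.length else 0), r))) := by
  simp only [get_ceph_row]
  set zs := row.map (fun r => ((if alignment == "r" then row.length - r.length else 0), r)) with hzs
  have hmap9 : zs.map pvPad = row.map (fun r =>
      List.replicate (if alignment == "r" then row.length - r.length else 0) (none : Option Int)
      ++ r.map some) := by
    rw [hzs, List.map_map]
    rfl
  have hP : (if alignment == "r" then
      pyZipLongest (row.map (fun r => List.replicate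
        (((pyZipLongest (row.map (fun r => r.map some))).headD []).length - r.length)
        (none : Option Int) ++ r.map some))
      else pyZipLongest (row.map (fun r => r.map some))) = pyZipLongest (zs.map pvPad) := by
    cases hb : (alignment == "r") with
    | true =>
      simp only [if_true]
      rw [hmap9]
      have hhead : ((pyZipLongest (row.map (fun r => r.map some))).headD []).length = row.length :=
        pv_maxlen_head row (hpre (eq_of_beq hb))
      rw [hhead]
      simp only [hb, if_true]
    | false =>
      simp only [Bool.false_eq_true, if_false]
      rw [hmap9]
      simp only [hb, Bool.false_eq_true, if_false]
      simp
  rw [hP]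
  simp only [pyZipLongest, pvRef]
  rw [pv_nums_filterMap, List.nil_append, List.filterMap_map, List.foldl_map]
  have hwidth : (fun (a : Nat) (p : Nat × List Int) => max a (pvPad p).length)
      = fun a p => max a (p.1 + p.2.length) := by
    funext a p
    simp [pvPad]
  rw [hwidth]
  congr 1
  apply List.filterMap_congr
  intro j _
  dsimp only [Function.comp]
  simp only [pv_col_eq]
  unfold pvApplyCol
  rw [pv_apply_none]

-- ===== VERDICT (by name: the statement is the Claim_ definition above) =====
theorem get_ceph_row_spec : Claim_equal_get_ceph_row := by
  intro row alignment _ hpre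
  unfold Spec_get_ceph_row
  rw [pv_A_eq_ref row alignment hpre, pv_B_eq_ref row alignment]
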